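-- pv_equiv track=rewrite | github.com/heniv96/mcp-jenkins-intelligence | services/advanced_ai_tools.py | _count_consecutive_failures
-- ===== SOURCE A (Python) =====
-- def _count_consecutive_failures(failed_builds: list[dict]) -> int:
--     """Count maximum consecutive failures."""
--     if not failed_builds:
--         return 0
--
--     # Sort by build number
--     sorted_failures = sorted(failed_builds, key=lambda x: x.get('number', 0))
--     max_consecutive = 1
--     current_consecutive = 1
--
--     for i in range(1, len(sorted_failures)):
--         if sorted_failures[i]['number'] == sorted_failures[i-1]['number'] + 1:
--             current_consecutive += 1
--             max_consecutive = max(max_consecutive, current_consecutive)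
--         else:
--             current_consecutive = 1
--
--     return max_consecutive
-- ===== SOURCE B (Python) =====
-- def _count_consecutive_failures(failed_builds: list[dict]) -> int:
--     """Count maximum consecutive failures."""
--     if not failed_builds:
--         return 0
--     if len(failed_builds) == 1:
--         return 1
--
--     numbers = sorted(b['number'] for b in failed_builds)
--
--     def runs(ns):
--         if not ns:
--             return []
--         j = 1
--         while j < len(ns) and ns[j] == ns[j - 1] + 1:
--             j += 1
--         return [j] + runs(ns[j:])
--
--     return max(runs(numbers))
-- ===== Notes on version B (the rewrite author's own statement) =====
-- stated objective: alternative
-- what changed: Replaces A's single index loop with two reset-style counters by a recursive decomposition of the sorted number list into maximal consecutive runs, returning the maximum run length; the numbers are extracted and sorted directly instead of sorting the dicts by key.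
import Mathlib
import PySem

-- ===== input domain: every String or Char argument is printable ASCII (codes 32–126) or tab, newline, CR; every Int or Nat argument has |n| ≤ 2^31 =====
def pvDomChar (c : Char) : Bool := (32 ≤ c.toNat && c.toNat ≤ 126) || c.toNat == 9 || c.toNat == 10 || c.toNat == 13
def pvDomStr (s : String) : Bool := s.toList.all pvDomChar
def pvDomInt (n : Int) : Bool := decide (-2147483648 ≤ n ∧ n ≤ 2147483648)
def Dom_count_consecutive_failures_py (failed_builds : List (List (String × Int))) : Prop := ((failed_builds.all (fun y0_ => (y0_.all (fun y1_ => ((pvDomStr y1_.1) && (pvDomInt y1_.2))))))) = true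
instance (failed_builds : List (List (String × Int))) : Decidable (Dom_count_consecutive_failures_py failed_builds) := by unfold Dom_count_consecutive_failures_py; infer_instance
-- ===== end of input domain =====

-- B restructures A's two-counter index scan into a recursive split of the sorted numbers into
-- maximal consecutive runs (max run length); same return value wherever A returns (objective: alternative).

-- shared helper: the value of d['number'] / d.get('number', 0).  Both Pythons read the 'number'
-- entry of a dict; `getD _ "number" 0` is exact for `.get('number', 0)` and agrees with `['number']`
-- whenever the key is present (Pre_ excludes the inputs where the Python raises KeyError).
def pvKey (d : List (String × Int)) : Int := PySem.Dict.getD (PySem.Dict.mk d) "number" 0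

-- ===== PORT A =====
def count_consecutive_failures_py (failed_builds : List (List (String × Int))) : Int :=
  if failed_builds = [] then 0
  else
    -- sorted_failures = sorted(failed_builds, key=...); for i in range(1, len(sorted_failures)):
    -- indexed accesses s[i]['number'], s[i-1]['number'];
    -- `pvKey (pyGetD s i [])` is exact where the Python returns (KeyError inputs are outside Pre_)
    (((PySem.List.pyRange 1 ((PySem.List.sorted failed_builds pvKey false).length : Int) 1).foldl
        (fun (st : Int × Int) i =>
          if pvKey (PySem.List.pyGetD (PySem.List.sorted failed_builds pvKey false) i []) = pvKey (PySem.List.pyGetD (PySem.List.sorted failed_builds pvKey false) (i - 1) []) + 1 then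
            (max st.1 (st.2 + 1), st.2 + 1)
          else (st.1, 1))
        (1, 1)).1)

-- ===== PORT B =====
-- takeRun prev ns = (number of leading elements of ns continuing the consecutive run after prev,
--                    the remaining suffix)  — the inner `while` of runs()
def pvTakeRun : Int → List Int → Int × List Int
  | _, [] => (0, [])
  | prev, x :: rest =>
    if x = prev + 1 then ((pvTakeRun x rest).1 + 1, (pvTakeRun x rest).2)
    else (0, x :: rest)

theorem pvTakeRun_snd_length_le : ∀ (rest : List Int) (prev : Int),
    (pvTakeRun prev rest).2.length ≤ rest.length := by
  intro rest
  induction rest with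
  | nil => intro prev; simp [pvTakeRun]
  | cons x r ih =>
    intro prev
    simp only [pvTakeRun]
    split
    · exact Nat.le_trans (ih x) (Nat.le_succ _)
    · simp

-- runs ns : list of the lengths of the maximal consecutive runs of the sorted list ns
def pvRuns : List Int → List Int
  | [] => []
  | x :: rest => ((pvTakeRun x rest).1 + 1) :: pvRuns (pvTakeRun x rest).2
termination_by ns => ns.length
decreasing_by
  exact Nat.lt_succ_of_le (pvTakeRun_snd_length_le rest x)

-- max(l) on a nonempty list (the [] case is unreachable in the port)
def pvMaxList : List Int → Int
  | [] => 0
  | h :: t => t.foldl max h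

def count_consecutive_failures_py_alt (failed_builds : List (List (String × Int))) : Int :=
  if failed_builds = [] then 0
  else if failed_builds.length = 1 then 1
  else
    -- sorted(b['number'] for b in failed_builds); `pvKey` is exact where the Python returns
    pvMaxList (pvRuns (PySem.List.sorted (failed_builds.map pvKey) (fun x => x) false))

-- ===== PRECONDITION & SPEC =====
-- Pre_ excludes exactly the inputs where the Python A raises KeyError: two or more builds and some
-- build without a 'number' key (the adjacent-pair loop then touches every element).
def Pre_count_consecutive_failures_py (failed_builds : List (List (String × Int))) : Prop :=
  failed_builds.length ≤ 1 ∨ ∀ d ∈ failed_builds, (PySem.Dict.mk d).contains "number" = true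
instance (failed_builds : List (List (String × Int))) : Decidable (Pre_count_consecutive_failures_py failed_builds) := by unfold Pre_count_consecutive_failures_py; infer_instance

def pvWitness_count_consecutive_failures_py : (List (List (String × Int))) :=
  [[("number", 3)], [("number", 4)], [("number", 7)]]

def Spec_count_consecutive_failures_py (failed_builds : List (List (String × Int))) (out : Int) : Prop := out = count_consecutive_failures_py_alt failed_builds
instance (failed_builds : List (List (String × Int))) (out : Int) : Decidable (Spec_count_consecutive_failures_py failed_builds out) := by unfold Spec_count_consecutive_failures_py; infer_instance

-- ===== CLAIM (what is proved, stated in full; the proofs are below) =====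
def Claim_equal_count_consecutive_failures_py : Prop := ∀ (failed_builds : List (List (String × Int))), Dom_count_consecutive_failures_py failed_builds → Pre_count_consecutive_failures_py failed_builds → Spec_count_consecutive_failures_py failed_builds (count_consecutive_failures_py failed_builds)

-- ===== LEMMAS AND PROOFS =====

-- structural form of A's index loop: state (cur, maxc), walking the numbers after prev
def pvLoopA : Int → Int → Int → List Int → Int
  | _, _, maxc, [] => maxc
  | prev, cur, maxc, x :: r =>
    if x = prev + 1 then pvLoopA x (cur + 1) (max maxc (cur + 1)) r
    else pvLoopA x 1 maxc r

theorem pv_le_foldl_max : ∀ (t : List Int) (h : Int), h ≤ t.foldl max h := by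
  intro t
  induction t with
  | nil => intro h; exact le_refl _
  | cons c t ih =>
    intro h
    exact le_trans (le_max_left h c) (ih (max h c))

theorem pv_head_le_pvMaxList (h : Int) (t : List Int) : h ≤ pvMaxList (h :: t) :=
  pv_le_foldl_max t h

theorem pv_foldl_max_cons : ∀ (t : List Int) (a b : Int), t.foldl max (max a b) = max a (t.foldl max b) := by
  intro t
  induction t with
  | nil => intro a b; rfl
  | cons c t ih =>
    intro a b
    simp only [List.foldl_cons, max_assoc]
    exact ih a (max b c)

theorem pvTakeRun_fst_nonneg : ∀ (rest : List Int) (prev : Int), 0 ≤ (pvTakeRun prev rest).1 := by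
  intro rest
  induction rest with
  | nil => intro prev; simp [pvTakeRun]
  | cons x r ih =>
    intro prev
    simp only [pvTakeRun]
    split
    · have := ih x; omega
    · simp

theorem pv_loopA_runs : ∀ (ns : List Int) (prev cur maxc : Int), 1 ≤ cur → cur ≤ maxc →
    pvLoopA prev cur maxc ns
      = max maxc (pvMaxList ((cur + (pvTakeRun prev ns).1) :: pvRuns (pvTakeRun prev ns).2)) := by
  intro ns
  induction ns with
  | nil =>
    intro prev cur maxc h1 h2
    simp only [pvLoopA, pvTakeRun, pvRuns, pvMaxList, List.foldl_nil, add_zero]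
    omega
  | cons x r ih =>
    intro prev cur maxc h1 h2
    by_cases hx : x = prev + 1
    · simp only [pvLoopA, pvTakeRun, if_pos hx]
      rw [ih x (cur + 1) (max maxc (cur + 1)) (by omega) (le_max_right _ _)]
      have hk := pvTakeRun_fst_nonneg r x
      have hM := pv_head_le_pvMaxList (cur + 1 + (pvTakeRun x r).1) (pvRuns (pvTakeRun x r).2)
      have he : cur + ((pvTakeRun x r).1 + 1) = cur + 1 + (pvTakeRun x r).1 := by omega
      rw [he]
      omega
    · simp only [pvLoopA, pvTakeRun, if_neg hx]
      rw [ih x 1 maxc (le_refl _) (by omega)]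
      show _ = max maxc (pvMaxList ((cur + 0) :: pvRuns (x :: r)))
      rw [pvRuns]
      have hc : pvMaxList ((cur + 0) :: ((pvTakeRun x r).1 + 1) :: pvRuns (pvTakeRun x r).2)
          = max (cur + 0) (pvMaxList (((pvTakeRun x r).1 + 1) :: pvRuns (pvTakeRun x r).2)) := by
        show (((pvTakeRun x r).1 + 1) :: pvRuns (pvTakeRun x r).2).foldl max (cur + 0) = _
        simp only [List.foldl_cons]
        rw [show max (cur + 0) ((pvTakeRun x r).1 + 1) = max (cur + 0) ((pvTakeRun x r).1 + 1) from rfl,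
            pv_foldl_max_cons]
        rfl
      rw [hc]
      have he : 1 + (pvTakeRun x r).1 = (pvTakeRun x r).1 + 1 := by omega
      rw [he]
      omega

-- bridge: A's foldl over range(k+1, len(s)) equals pvLoopA over the mapped suffix
theorem pv_bridge (s : List (List (String × Int))) :
    ∀ (m k : Nat), k + 1 + m = s.length → ∀ (maxc cur : Int),
    ((PySem.List.pyRange ((k : Int) + 1) (s.length : Int) 1).foldl
        (fun (st : Int × Int) i =>
          if pvKey (PySem.List.pyGetD s i []) = pvKey (PySem.List.pyGetD s (i - 1) []) + 1 then
            (max st.1 (st.2 + 1), st.2 + 1)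
          else (st.1, 1)) (maxc, cur)).1
      = pvLoopA (pvKey (s.getD k [])) cur maxc ((s.map pvKey).drop (k + 1)) := by
  intro m
  induction m with
  | zero =>
    intro k hk maxc cur
    rw [PySem.List.pyRange_one_eq_nil (by omega)]
    rw [List.drop_eq_nil_of_le (by simp; omega)]
    rfl
  | succ m ih =>
    intro k hk maxc cur
    have hklt : k + 1 < s.length := by omega
    rw [PySem.List.pyRange_one_cons (by omega)]
    rw [List.foldl_cons]
    have hget1 : PySem.List.pyGetD s ((k : Int) + 1) [] = s[k + 1] := by
      rw [show ((k : Int) + 1) = ((k + 1 : Nat) : Int) by push_cast; ring]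
      rw [PySem.List.pyGetD_natCast]
      exact List.getD_eq_getElem s [] hklt
    have hget0 : PySem.List.pyGetD s ((k : Int) + 1 - 1) [] = s.getD k [] := by
      rw [show ((k : Int) + 1 - 1) = ((k : Nat) : Int) by ring]
      rw [PySem.List.pyGetD_natCast]
    have hdrop : (s.map pvKey).drop (k + 1) = pvKey s[k + 1] :: (s.map pvKey).drop (k + 1 + 1) := by
      rw [List.drop_eq_getElem_cons (by simp; omega)]
      simp
    have hIH := fun maxc cur => ih (k + 1) (by omega) maxc cur
    rw [show ((k : Int) + 1 + 1) = (((k + 1 : Nat) : Int) + 1) by push_cast; ring] at *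
    have hgetk1 : s.getD (k + 1) [] = s[k + 1] := List.getD_eq_getElem s [] hklt
    rw [hdrop]
    simp only [hget1, hget0]
    by_cases hc : pvKey s[k + 1] = pvKey (s.getD k []) + 1
    · rw [if_pos hc]
      show _ = pvLoopA (pvKey (s.getD k [])) cur maxc (pvKey s[k + 1] :: _)
      rw [pvLoopA, if_pos hc]
      rw [hIH (max maxc (cur + 1)) (cur + 1), hgetk1]
    · rw [if_neg hc]
      show _ = pvLoopA (pvKey (s.getD k [])) cur maxc (pvKey s[k + 1] :: _)
      rw [pvLoopA, if_neg hc]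
      rw [hIH maxc 1, hgetk1]

-- the numbers of the key-sorted dicts are the sorted numbers
theorem pv_map_key_sorted (fb : List (List (String × Int))) :
    (PySem.List.sorted fb pvKey false).map pvKey
      = PySem.List.sorted (fb.map pvKey) (fun x => x) false := by
  symm
  apply PySem.List.sorted_id_eq_of_perm_of_pairwise
  · exact (PySem.List.sorted_perm fb pvKey false).map pvKey
  · exact PySem.List.sorted_map_key_pairwise fb pvKey

-- ===== VERDICT (by name: the statement is the Claim_ definition above) =====
theorem count_consecutive_failures_py_spec : Claim_equal_count_consecutive_failures_py := by
  intro fb hDom hPre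
  unfold Spec_count_consecutive_failures_py
  unfold count_consecutive_failures_py count_consecutive_failures_py_alt
  by_cases h0 : fb = []
  · simp [h0]
  · rw [if_neg h0, if_neg h0]
    have hlen : 1 ≤ fb.length := by
      cases fb with
      | nil => exact absurd rfl h0
      | cons a l => simp
    by_cases h1 : fb.length = 1
    · rw [if_pos h1]
      have hs : (PySem.List.sorted fb pvKey false).length = fb.length :=
        PySem.List.length_sorted fb pvKey false
      rw [show ((PySem.List.sorted fb pvKey false).length : Int) = 1 by rw [hs, h1]; rfl]
      rw [PySem.List.pyRange_one_eq_nil (le_refl 1)]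
      rfl
    · rw [if_neg h1]
      have hlen2 : 2 ≤ fb.length := by omega
      have hs : (PySem.List.sorted fb pvKey false).length = fb.length :=
        PySem.List.length_sorted fb pvKey false
      have hbr := pv_bridge (PySem.List.sorted fb pvKey false) (fb.length - 1) 0 (by omega) 1 1
      rw [show ((0 : Nat) : Int) + 1 = 1 by norm_num] at hbr
      rw [hbr]
      have hne : PySem.List.sorted fb pvKey false ≠ [] := by
        intro h
        rw [PySem.List.sorted_eq_nil_iff] at h
        exact h0 h
      obtain ⟨y, t, hyt⟩ := List.exists_cons_of_ne_nil hne
      rw [hyt]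
      show pvLoopA (pvKey y) 1 1 (t.map pvKey) = pvMaxList (pvRuns (PySem.List.sorted (fb.map pvKey) (fun x => x) false))
      rw [← pv_map_key_sorted fb, hyt]
      show pvLoopA (pvKey y) 1 1 (t.map pvKey) = pvMaxList (pvRuns (pvKey y :: t.map pvKey))
      rw [pv_loopA_runs (t.map pvKey) (pvKey y) 1 1 (le_refl _) (le_refl _)]
      rw [pvRuns]
      have hk := pvTakeRun_fst_nonneg (t.map pvKey) (pvKey y)
      have hM := pv_head_le_pvMaxList ((pvTakeRun (pvKey y) (t.map pvKey)).1 + 1)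
        (pvRuns (pvTakeRun (pvKey y) (t.map pvKey)).2)
      rw [show (1 : Int) + (pvTakeRun (pvKey y) (t.map pvKey)).1
          = (pvTakeRun (pvKey y) (t.map pvKey)).1 + 1 by omega]
      omega
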